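-- pv_equiv track=rewrite | github.com/sungone/2024-ScriptingLanguage | week1/homework2-6.py | add_digit
-- ===== SOURCE A (Python) =====
-- def add_digit(num) :
--     sum = 0
--     digit = (num % 10)
--     for i in range(digit , -1 , -1) :
--         set_num =  num // pow(10 , i)
--         sum += set_num
--         num -= set_num * pow(10 , i)
--     return sum
-- ===== SOURCE B (Python) =====
-- def add_digit(num):
--     # Split num at 10**d (d = last digit): high chunk in closed form,
--     # then sum the d low digits bottom-up.
--     d = num % 10
--     p = 10 ** d
--     high = num // p
--     low = num % p
--     s = 0
--     while low > 0:
--         s += low % 10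
--         low //= 10
--     return high + s
-- ===== Notes on version B (the rewrite author's own statement) =====
-- stated objective: simpler
-- what changed: A peels the number top-down from position d (the last digit) with repeated pow and subtraction; B splits num once at the d-th power of ten (high quotient in closed form) and sums the low part's digits with a bottom-up while-loop.
import Mathlib
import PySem

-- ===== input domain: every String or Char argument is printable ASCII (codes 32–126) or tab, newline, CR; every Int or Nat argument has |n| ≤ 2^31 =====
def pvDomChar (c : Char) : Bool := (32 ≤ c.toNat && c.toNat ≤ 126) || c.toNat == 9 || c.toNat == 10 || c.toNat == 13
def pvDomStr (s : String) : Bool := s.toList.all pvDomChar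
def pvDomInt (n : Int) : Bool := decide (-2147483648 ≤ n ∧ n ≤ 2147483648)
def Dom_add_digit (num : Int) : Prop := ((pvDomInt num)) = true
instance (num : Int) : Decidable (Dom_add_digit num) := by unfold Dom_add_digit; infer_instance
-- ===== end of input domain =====

-- B replaces A's top-down positional peeling (pow + repeated subtraction from position d down
-- to 0) by one split of num at 10^d plus a bottom-up digit-sum loop on the low part (simpler).


-- ===== PORT A =====
-- for i in range(digit, -1, -1): sum += num // 10**i; num -= (num // 10**i) * 10**i
-- pow(10, i) with i ≥ 0 (every i in the range is ≥ 0) is (10:Int) ^ i.toNat.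
def add_digit (num : Int) : Int :=
  let digit := PySem.Int.mod num 10
  let st := (PySem.List.pyRange digit (-1) (-1)).foldl
    (fun (p : Int × Int) i =>
      let set_num := PySem.Int.floordiv p.2 ((10:Int) ^ i.toNat)
      (p.1 + set_num, p.2 - set_num * (10:Int) ^ i.toNat))
    (0, num)
  st.1

-- ===== PORT B =====
-- while low > 0: s += low % 10; low //= 10
def addDigitLow (low s : Int) : Int :=
  if _h : 0 < low then
    addDigitLow (PySem.Int.floordiv low 10) (s + PySem.Int.mod low 10)
  else s
termination_by low.toNat
decreasing_by
  rw [PySem.Int.floordiv_eq_ediv_of_pos (by norm_num)]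
  omega

def add_digit_alt (num : Int) : Int :=
  let d := PySem.Int.mod num 10
  let p : Int := 10 ^ d.toNat    -- 10 ** d, d = num % 10 ≥ 0
  let high := PySem.Int.floordiv num p
  let low := PySem.Int.mod num p
  high + addDigitLow low 0

-- ===== PRECONDITION & SPEC =====
def Spec_add_digit (num : Int) (out : Int) : Prop := out = add_digit_alt num
instance (num : Int) (out : Int) : Decidable (Spec_add_digit num out) := by unfold Spec_add_digit; infer_instance

-- ===== CLAIM (what is proved, stated in full; the proofs are below) =====
def Claim_equal_add_digit : Prop := ∀ (num : Int), Dom_add_digit num → Spec_add_digit num (add_digit num)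

-- ===== LEMMAS AND PROOFS =====

-- one-step unfolding of B's loop
theorem addDigitLow_eq (low s : Int) :
    addDigitLow low s =
      if 0 < low then addDigitLow (PySem.Int.floordiv low 10) (s + PySem.Int.mod low 10)
      else s := by
  rw [addDigitLow]
  split <;> rfl

theorem addDigitLow_zero (s : Int) : addDigitLow 0 s = s := by
  rw [addDigitLow_eq]; simp

-- accumulator shift for B's loop
theorem addDigitLow_shift : ∀ (n : Nat) (low s : Int), low.toNat = n →
    addDigitLow low s = s + addDigitLow low 0 := by
  intro n
  induction n using Nat.strong_induction_on with
  | _ n ih =>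
    intro low s hn
    rw [addDigitLow_eq low s, addDigitLow_eq low 0]
    split_ifs with h
    · have hd : PySem.Int.floordiv low 10 = low / 10 :=
        PySem.Int.floordiv_eq_ediv_of_pos (by norm_num)
      have hlt : (PySem.Int.floordiv low 10).toNat < n := by rw [hd]; omega
      rw [ih _ hlt _ (s + PySem.Int.mod low 10) rfl,
          ih _ hlt _ (0 + PySem.Int.mod low 10) rfl]
      ring
    · ring

theorem addDigitLow_shift' (low s : Int) : addDigitLow low s = s + addDigitLow low 0 :=
  addDigitLow_shift low.toNat low s rfl

-- peeling the TOP digit commutes with B's bottom-up loop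
theorem addDigitLow_split : ∀ (k : Nat) (n s : Int), 0 ≤ n → n < 10 ^ (k + 1) →
    addDigitLow n s = addDigitLow (n % 10 ^ k) (s + n / 10 ^ k) := by
  intro k
  induction k with
  | zero =>
    intro n s hn hlt
    simp only [pow_zero, Int.emod_one, Int.ediv_one] at *
    rw [addDigitLow_zero, addDigitLow_eq]
    split_ifs with h
    · rw [PySem.Int.mod_eq_emod_of_pos (by norm_num),
          PySem.Int.floordiv_eq_ediv_of_pos (by norm_num)]
      have h10 : n / 10 = 0 := by omega
      have hm : n % 10 = n := by omega
      rw [h10, hm, addDigitLow_zero]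
    · omega
  | succ k ih =>
    intro n s hn hlt
    have hpk : (0:Int) < 10 ^ k := by positivity
    have hpk1 : (0:Int) < 10 ^ (k + 1) := by positivity
    rw [addDigitLow_eq n s]
    split_ifs with h
    · rw [PySem.Int.mod_eq_emod_of_pos (by norm_num),
          PySem.Int.floordiv_eq_ediv_of_pos (by norm_num)]
      have hn10 : 0 ≤ n / 10 := by omega
      have hn10lt : n / 10 < 10 ^ (k + 1) := by
        have hx : n < 10 ^ (k + 1) * 10 := by
          rw [show (10:Int) ^ (k+1) * 10 = 10 ^ (k + 1 + 1) by ring]; exact hlt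
        omega
      rw [ih (n / 10) (s + n % 10) hn10 hn10lt]
      -- name the two pieces of n at 10^(k+1)
      have hqr : n = 10 ^ (k + 1) * (n / 10 ^ (k + 1)) + n % 10 ^ (k + 1) := by
        rw [Int.emod_def]; ring
      set q := n / 10 ^ (k + 1) with hq
      set r := n % 10 ^ (k + 1) with hr
      have hr0 : 0 ≤ r := Int.emod_nonneg n (by positivity)
      have hrlt : r < 10 ^ (k + 1) := Int.emod_lt_of_pos n hpk1
      have hd10 : n / 10 = 10 ^ k * q + r / 10 := by
        rw [show n = 10 * (10 ^ k * q) + r by rw [hqr]; ring,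
            Int.mul_add_ediv_left _ _ (by norm_num : (10:Int) ≠ 0)]
      have hr10lt : r / 10 < 10 ^ k := by
        have hx : r < 10 ^ k * 10 := by
          rw [show (10:Int) ^ k * 10 = 10 ^ (k + 1) by ring]; exact hrlt
        omega
      have hmodk : (n / 10) % 10 ^ k = r / 10 := by
        rw [hd10, show (10:Int) ^ k * q + r / 10 = r / 10 + 10 ^ k * q by ring,
            Int.add_mul_emod_self_left, Int.emod_eq_of_lt (by omega) hr10lt]
      have hdivk : (n / 10) / 10 ^ k = q := by
        rw [hd10, Int.mul_add_ediv_left _ _ (by positivity : (10:Int) ^ k ≠ 0),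
            Int.ediv_eq_zero_of_lt (by omega) hr10lt, add_zero]
      have hmod10 : n % 10 = r % 10 := by
        rw [show n = r + 10 * (10 ^ k * q) by rw [hqr]; ring, Int.add_mul_emod_self_left]
      rw [hmodk, hdivk, hmod10]
      -- RHS: unfold one step of the loop on r
      rw [addDigitLow_eq r (s + q)]
      split_ifs with hrpos
      · rw [PySem.Int.mod_eq_emod_of_pos (by norm_num),
            PySem.Int.floordiv_eq_ediv_of_pos (by norm_num)]
        congr 1
        ring
      · have hr0' : r = 0 := by omega
        have hrd : r / 10 = 0 := by simp [hr0']
        have hrm : r % 10 = 0 := by simp [hr0']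
        rw [hrd, hrm, addDigitLow_zero]
        ring
    · have hn0 : n = 0 := by omega
      rw [hn0]
      simp only [Int.zero_emod, Int.zero_ediv, add_zero]
      rw [addDigitLow_zero]

-- A's countdown fold equals B's loop, for 0 <= n < 10^k starting at position k-1
theorem foldA (k : Nat) : ∀ (s n : Int), 0 ≤ n → n < 10 ^ k →
    ((PySem.List.pyRange ((k : Int) - 1) (-1) (-1)).foldl
      (fun (p : Int × Int) i =>
        let set_num := PySem.Int.floordiv p.2 ((10:Int) ^ i.toNat)
        (p.1 + set_num, p.2 - set_num * (10:Int) ^ i.toNat))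
      (s, n)).1 = addDigitLow n s := by
  induction k with
  | zero =>
    intro s n hn hlt
    rw [PySem.List.pyRange_neg_one_eq_nil (by norm_num)]
    have hn0 : n = 0 := by omega
    rw [hn0, addDigitLow_zero]
    rfl
  | succ k ih =>
    intro s n hn hlt
    have hpk : (0:Int) < 10 ^ k := by positivity
    rw [show ((k + 1 : Nat) : Int) - 1 = (k : Int) by push_cast; ring,
        PySem.List.pyRange_neg_one_cons (by omega : (-1:Int) < (k : Int)),
        List.foldl_cons]
    simp only
    rw [Int.toNat_natCast k,
        PySem.Int.floordiv_eq_ediv_of_pos hpk,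
        show n - n / 10 ^ k * 10 ^ k = n % 10 ^ k by rw [Int.emod_def]; ring]
    have h1 : 0 ≤ n % 10 ^ k := Int.emod_nonneg n (by positivity)
    have h2 : n % 10 ^ k < 10 ^ k := Int.emod_lt_of_pos n hpk
    rw [show (k : Int) - 1 = ((k : Nat) : Int) - 1 by norm_num,
        ih (s + n / 10 ^ k) (n % 10 ^ k) h1 h2]
    exact (addDigitLow_split k n s hn hlt).symm

-- ===== VERDICT (by name: the statement is the Claim_ definition above) =====
theorem add_digit_spec : Claim_equal_add_digit := by
  unfold Claim_equal_add_digit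
  intro num _
  unfold Spec_add_digit add_digit add_digit_alt
  simp only
  have h10 : (0:Int) < 10 := by norm_num
  have hdm : PySem.Int.mod num 10 = num % 10 := PySem.Int.mod_eq_emod_of_pos h10
  set d := PySem.Int.mod num 10 with hd
  have hd0 : 0 ≤ d := by rw [hdm]; exact Int.emod_nonneg num (by norm_num)
  have hpk : (0:Int) < 10 ^ d.toNat := by positivity
  -- peel the first loop iteration (i = d)
  rw [PySem.List.pyRange_neg_one_cons (by omega : (-1:Int) < d), List.foldl_cons]
  simp only
  rw [PySem.Int.floordiv_eq_ediv_of_pos hpk,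
      show num - num / 10 ^ d.toNat * 10 ^ d.toNat = num % 10 ^ d.toNat by
        rw [Int.emod_def]; ring,
      show d - 1 = ((d.toNat : Nat) : Int) - 1 by omega,
      foldA d.toNat (0 + num / 10 ^ d.toNat) (num % 10 ^ d.toNat)
        (Int.emod_nonneg num (by positivity)) (Int.emod_lt_of_pos num hpk),
      addDigitLow_shift', PySem.Int.mod_eq_emod_of_pos hpk]
  ring
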